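-- pv_equiv track=rewrite | github.com/sheilsplenbluli/csvwrangler | csvwrangler/lag.py | lag_column
-- ===== SOURCE A (Python) =====
-- from typing import List, Dict, Any, Optional
--
-- def lag_column(
--     rows: List[Dict[str, Any]],
--     column: str,
--     periods: int = 1,
--     dest: Optional[str] = None,
--     fill: str = "",
-- ) -> List[Dict[str, Any]]:
--     """Add a lagged version of *column* (shifted forward by *periods* rows)."""
--     if periods < 1:
--         raise ValueError("periods must be >= 1")
--     dest = dest or f"{column}_lag{periods}"
--     result = []
--     for i, row in enumerate(rows):
--         new_row = dict(row)
--         src_index = i - periods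
--         if src_index < 0:
--             new_row[dest] = fill
--         else:
--             new_row[dest] = rows[src_index].get(column, fill)
--         result.append(new_row)
--     return result
-- ===== SOURCE B (Python) =====
-- def lag_column(rows, column, periods=1, dest=None, fill=""):
--     """Add a lagged version of *column* (shifted forward by *periods* rows)."""
--     if periods < 1:
--         raise ValueError("periods must be >= 1")
--     dest = dest or f"{column}_lag{periods}"
--     n = len(rows)
--     lagged = [fill] * min(periods, n) + [r.get(column, fill) for r in rows[:-periods]]
--     out = []
--     for row, value in zip(rows, lagged):
--         new_row = dict(row)
--         new_row[dest] = value
--         out.append(new_row)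
--     return out
-- ===== Notes on version B (the rewrite author's own statement) =====
-- stated objective: alternative
-- what changed: B first materialises the whole lagged column as a standalone list ([fill]*periods prepended to the per-row lookups) and then zips it with rows in one pass, eliminating A's per-row src_index<0 branch and indexed access rows[i-periods].
import Mathlib
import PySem

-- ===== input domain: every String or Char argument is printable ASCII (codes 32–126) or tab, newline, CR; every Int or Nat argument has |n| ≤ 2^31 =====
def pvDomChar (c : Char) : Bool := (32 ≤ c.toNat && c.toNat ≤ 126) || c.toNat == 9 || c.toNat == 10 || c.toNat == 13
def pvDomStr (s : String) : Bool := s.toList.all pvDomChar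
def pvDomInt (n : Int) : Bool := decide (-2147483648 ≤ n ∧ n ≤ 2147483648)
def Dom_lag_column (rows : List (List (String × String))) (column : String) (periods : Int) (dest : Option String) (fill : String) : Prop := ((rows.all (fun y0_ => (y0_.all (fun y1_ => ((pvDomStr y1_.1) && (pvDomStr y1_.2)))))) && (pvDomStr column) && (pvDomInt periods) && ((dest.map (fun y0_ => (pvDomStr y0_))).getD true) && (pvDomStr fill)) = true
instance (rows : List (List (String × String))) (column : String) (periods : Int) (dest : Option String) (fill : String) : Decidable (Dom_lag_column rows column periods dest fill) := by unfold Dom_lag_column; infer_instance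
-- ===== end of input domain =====

-- B builds the lagged column as a standalone list and zips it with rows in one pass,
-- replacing A's per-row negative-index branch and rows[i-periods] access (objective: alternative).


-- ===== PORT A =====
def lag_column (rows : List (List (String × String))) (column : String) (periods : Int) (dest : Option String) (fill : String) : List (List (String × String)) :=
  -- dest = dest or f"{column}_lag{periods}"
  let destName : String := match dest with
    | none => column ++ "_lag" ++ PySem.Int.toStr periods
    | some s => if s = "" then column ++ "_lag" ++ PySem.Int.toStr periods else s
  -- for i, row in enumerate(rows): … result.append(new_row)
  (PySem.List.enumerate rows 0).foldl (fun result p =>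
    let newRow := PySem.Dict.ofList p.2
    let srcIndex := p.1 - periods
    let newRow :=
      if srcIndex < 0 then newRow.insert destName fill
      else newRow.insert destName ((PySem.Dict.ofList (PySem.List.pyGetD rows srcIndex [])).getD column fill)
    result ++ [newRow.items]) []

-- ===== PORT B =====
def lag_column_alt (rows : List (List (String × String))) (column : String) (periods : Int) (dest : Option String) (fill : String) : List (List (String × String)) :=
  let destName : String := match dest with
    | none => column ++ "_lag" ++ PySem.Int.toStr periods
    | some s => if s = "" then column ++ "_lag" ++ PySem.Int.toStr periods else s
  -- lagged = [fill]*min(periods, n) + [r.get(column, fill) for r in rows[:-periods]]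
  let n := rows.length
  let lagged := List.replicate (min periods (n : Int)).toNat fill ++
    (PySem.List.slice rows none (some (-periods))).map (fun r => (PySem.Dict.ofList r).getD column fill)
  -- for row, value in zip(rows, lagged): …
  (rows.zip lagged).map (fun p => ((PySem.Dict.ofList p.1).insert destName p.2).items)

-- ===== PRECONDITION & SPEC =====
-- Pre_ excludes periods < 1, where the Python A raises ValueError (and B does too).
def Pre_lag_column (rows : List (List (String × String))) (column : String) (periods : Int) (dest : Option String) (fill : String) : Prop := 1 ≤ periods
instance (rows : List (List (String × String))) (column : String) (periods : Int) (dest : Option String) (fill : String) : Decidable (Pre_lag_column rows column periods dest fill) := by unfold Pre_lag_column; infer_instance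
def pvWitness_lag_column : (List (List (String × String))) × String × Int × Option String × String :=
  ([[("a", "1"), ("b", "2")], [("a", "3")]], "a", 1, none, "")
def Spec_lag_column (rows : List (List (String × String))) (column : String) (periods : Int) (dest : Option String) (fill : String) (out : List (List (String × String))) : Prop := out = lag_column_alt rows column periods dest fill
instance (rows : List (List (String × String))) (column : String) (periods : Int) (dest : Option String) (fill : String) (out : List (List (String × String))) : Decidable (Spec_lag_column rows column periods dest fill out) := by unfold Spec_lag_column; infer_instance

-- ===== CLAIM (what is proved, stated in full; the proofs are below) =====
def Claim_equal_lag_column : Prop := ∀ (rows : List (List (String × String))) (column : String) (periods : Int) (dest : Option String) (fill : String), Dom_lag_column rows column periods dest fill → Pre_lag_column rows column periods dest fill → Spec_lag_column rows column periods dest fill (lag_column rows column periods dest fill)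

-- ===== LEMMAS AND PROOFS =====

-- ===== VERDICT (by name: the statement is the Claim_ definition above) =====
theorem lag_column_spec : Claim_equal_lag_column := by
  intro rows column periods dest fill _ hpre
  unfold Spec_lag_column lag_column lag_column_alt
  rw [PySem.List.foldl_append_singleton_eq_map]
  simp only [List.nil_append]
  have hp : 1 ≤ periods := hpre
  have hsl : PySem.List.slice rows none (some (-periods)) = rows.take (rows.length - periods.toNat) := by
    have hk : periods = ((periods.toNat : Nat) : Int) := by omega
    rw [hk, PySem.List.slice_to_neg_natCast rows periods.toNat (by omega)]
    congr 1
  apply List.ext_getElem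
  · simp only [List.length_map, List.length_zip, PySem.List.length_enumerate, List.length_append,
      List.length_replicate, List.length_take, hsl]
    omega
  · intro i h1 h2
    simp [PySem.List.length_enumerate, hsl] at h1 h2
    simp only [hsl]
    rw [List.getElem_map, List.getElem_map, PySem.List.getElem_enumerate, List.getElem_zip]
    by_cases hc : (i : Int) < periods
    · rw [if_pos (by omega : (0 : Int) + i - periods < 0)]
      rw [List.getElem_append_left (by simp; omega)]
      simp
    · rw [if_neg (by omega : ¬ (0 : Int) + i - periods < 0)]
      rw [PySem.List.pyGetD_eq_getElem rows [] (by omega) (by push_cast; omega)]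
      have hidx : ((0 : Int) + i - periods).toNat = i - periods.toNat := by omega
      simp only [hidx]
      rw [List.getElem_append_right (by simp; omega), List.getElem_map, List.getElem_take]
      have hmin : (min periods (rows.length : Int)).toNat = periods.toNat := by omega
      simp [hmin]
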